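-- pv_equiv track=rewrite | github.com/eliottcassidy2000/math | 04-computation/hook_positivity_test.py | chi_hook
-- ===== SOURCE A (Python) =====
-- def chi_hook(hook_part, mu):
--     """
--     Character of hook representation (k, 1^{n-k}) at conjugacy class mu.
--
--     Formula: chi^{(k,1^{n-k})}(mu) = sum over i where cycle type mu has a cycle
--     of length >= 1: use Murnaghan-Nakayama rule.
--
--     For hooks, there's a nice combinatorial formula:
--     chi^{(k,1^{n-k})}(mu) = sum over border-strip tableaux of mu type...
--
--     Actually, for hook characters there's an explicit formula:
--     chi^{(n-j, 1^j)}(sigma) = sum_{S subset of fixed points of sigma, |S|=j, ...}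
--     Hmm, this is getting complicated.
--
--     Let me use a direct approach: the hook character can be computed as:
--     chi^{(k,1^{n-k})}(mu) = e_{n-k}(x_1, ..., x_r) evaluated at x_i = omega^{mu_i}
--     where omega = e^{2pi i / lcm(mu)}.
--
--     Actually, the simplest formula for hooks:
--
--     Let sigma be a permutation of type mu. Then:
--     chi^{(n-j, 1^j)}(sigma) = (-1)^j * e_j(y_1-1, y_2-1, ..., y_r-1)
--     where y_i are the cycle lengths of sigma (so y_i = mu_i).
--
--     Wait, that's not quite right either. Let me use the correct formula.
--
--     For the hook (k, 1^{n-k}), the character at type mu = (mu_1, ..., mu_r) is: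
--
--     chi^{(k,1^{n-k})}(mu) = sum over subsets S of [r] with sum_{i in S} mu_i = n-k
--                               of prod_{i in S} (-1)^{mu_i - 1}
--
--     This comes from the Murnaghan-Nakayama rule: a border strip of size mu_i
--     can be placed either horizontally (in the first row, contributing +1)
--     or vertically (in the first column, contributing (-1)^{mu_i-1}).
--     We need the horizontal strips to total k, so vertical strips total n-k.
--
--     Actually: the character of hook (k, 1^{n-k}) evaluated at a permutation
--     with cycle type mu = (mu_1, ..., mu_r) is:
--
--     chi = sum over subsets S of {1,...,r}:
--           sum_{i in S} mu_i = n-k (placed in column)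
--           prod_{i in S} (-1)^{mu_i-1} * prod_{i not in S} 1
--
--     = sum over S with sum mu_i = n-k of (-1)^{sum(mu_i-1) for i in S}
--     = sum over S with sum mu_i = n-k of (-1)^{(n-k) - |S|}
--     """
--     n = sum(mu)
--     target = n - hook_part[0]  # n-k = number of 1's in hook
--
--     # Enumerate subsets S of cycle lengths that sum to target
--     # mu_sorted = sorted list of cycle lengths
--     mu_list = list(mu)
--     r = len(mu_list)
--
--     total_chi = 0
--
--     # Use bitmask to enumerate subsets
--     for mask in range(1 << r):
--         s = sum(mu_list[i] for i in range(r) if (mask >> i) & 1)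
--         if s == target:
--             num_selected = bin(mask).count('1')
--             # Sign: (-1)^{target - num_selected}
--             total_chi += (-1)**(target - num_selected)
--
--     return total_chi
-- ===== SOURCE B (Python) =====
-- def chi_hook(hook_part, mu):
--     """Hook character chi^{(k,1^{n-k})}(mu) via a subset-sum DP.
--
--     dp maps each achievable subset sum s of the cycle lengths processed so
--     far to the signed count sum_{S : sum(S)=s} (-1)^{|S|}; the answer is
--     (-1)^target * dp[target].
--     """
--     target = sum(mu) - hook_part[0]
--     dp = {0: 1}
--     for m in mu:
--         ndp = dict(dp)
--         for s, c in dp.items():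
--             ndp[s + m] = ndp.get(s + m, 0) - c
--         dp = ndp
--     sign = 1 if target % 2 == 0 else -1
--     return sign * dp.get(target, 0)
-- ===== Notes on version B (the rewrite author's own statement) =====
-- stated objective: faster
-- what changed: Replaced A's enumeration of all 2^r bitmask subsets of mu by a one-pass subset-sum DP over a dict mapping each achievable subset sum to its signed count sum (-1)^|S|, multiplying by (-1)^target at the end.
-- outside the precondition, e.g. on chi_hook([0], [-2]): A returns -1.0, B returns -1; on chi_hook([], [1]): A raises IndexError, B raises IndexError
import Mathlib
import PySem

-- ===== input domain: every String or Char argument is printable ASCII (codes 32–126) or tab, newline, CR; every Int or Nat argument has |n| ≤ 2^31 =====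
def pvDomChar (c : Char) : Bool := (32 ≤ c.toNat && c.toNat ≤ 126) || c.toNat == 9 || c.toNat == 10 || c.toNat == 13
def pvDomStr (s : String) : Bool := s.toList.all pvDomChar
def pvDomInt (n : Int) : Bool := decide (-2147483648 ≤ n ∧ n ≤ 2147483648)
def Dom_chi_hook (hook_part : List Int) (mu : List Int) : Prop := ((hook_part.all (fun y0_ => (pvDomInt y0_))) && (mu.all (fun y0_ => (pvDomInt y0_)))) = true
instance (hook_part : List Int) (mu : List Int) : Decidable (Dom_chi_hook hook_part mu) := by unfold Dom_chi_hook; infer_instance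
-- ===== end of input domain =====

-- B replaces A's O(2^r · r) bitmask enumeration of all subsets of mu by a
-- subset-sum DP over a dict of signed counts per achievable sum (asymptotically faster).

-- ===== PORT A =====
-- Literal port of A: for every mask in range(1 << r), sum the selected cycle
-- lengths; if the sum hits target, add (-1)**(target - popcount(mask)).
-- 'Nat.testBit mask i' ports '(mask >> i) & 1'; 'bin(mask).count("1")' is
-- PySem.Int.bitCount (the number of set bits); '(-1)**e' is ported by the
-- parity of e, exact for e ≥ 0 (the only exponents reached inside
-- Pre_chi_hook; outside Pre_ A can produce a Python float).
def chi_hook (hook_part : List Int) (mu : List Int) : Int :=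
  let n := mu.sum
  -- hook_part[0]: IndexError on empty hook_part is excluded by Pre_chi_hook
  let target := n - (PySem.List.pyGet? hook_part 0).getD 0
  let r := mu.length
  (List.range (2 ^ r)).foldl
    (fun total_chi mask =>
      -- s = sum(mu_list[i] for i in range(r) if (mask >> i) & 1)
      let s := (List.range r).foldl
        (fun acc i => if Nat.testBit mask i then acc + (PySem.List.pyGet? mu (Int.ofNat i)).getD 0 else acc) 0
      if s = target then
        let num_selected := PySem.Int.bitCount (mask : Int)
        total_chi + (if PySem.Int.mod (target - (num_selected : Int)) 2 = 0 then (1 : Int) else -1)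
      else total_chi) 0

-- ===== PORT B =====
-- Literal port of B (Source B): dp maps each achievable subset sum s ≤ target to
-- the signed count Σ_{S : sum S = s} (-1)^{|S|}; answer = (-1)^target · dp[target].
def chi_hook_alt (hook_part : List Int) (mu : List Int) : Int :=
  let target := mu.sum - (PySem.List.pyGet? hook_part 0).getD 0
  let dp := mu.foldl
    (fun dp m =>
      -- ndp = dict(dp); for s, c in dp.items(): ndp[s + m] = ndp.get(s + m, 0) - c
      dp.items.foldl
        (fun ndp sc => ndp.insert (sc.1 + m) (ndp.getD (sc.1 + m) 0 - sc.2))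
        dp)
    (PySem.Dict.ofList [((0 : Int), (1 : Int))])
  let sign : Int := if PySem.Int.mod target 2 = 0 then 1 else -1
  sign * dp.getD target 0

-- ===== PRECONDITION & SPEC =====
-- Pre_ excludes exactly the inputs on which A does not return an int: an empty
-- hook_part (A raises IndexError on hook_part[0]) and inputs where some subset
-- of mu sums to target with more than target elements (then A's
-- (-1)**(target - num_selected) has a negative exponent and returns a float).
def Pre_chi_hook (hook_part : List Int) (mu : List Int) : Prop :=
  hook_part ≠ [] ∧
    ∀ S ∈ mu.sublists, S.sum = mu.sum - (PySem.List.pyGet? hook_part 0).getD 0 →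
      (S.length : Int) ≤ mu.sum - (PySem.List.pyGet? hook_part 0).getD 0
instance (hook_part : List Int) (mu : List Int) : Decidable (Pre_chi_hook hook_part mu) := by
  unfold Pre_chi_hook; infer_instance

def pvWitness_chi_hook : List Int × List Int := ([2], [2, 1, 1])

def Spec_chi_hook (hook_part : List Int) (mu : List Int) (out : Int) : Prop := out = chi_hook_alt hook_part mu
instance (hook_part : List Int) (mu : List Int) (out : Int) : Decidable (Spec_chi_hook hook_part mu out) := by unfold Spec_chi_hook; infer_instance

-- ===== CLAIM (what is proved, stated in full; the proofs are below) =====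
def Claim_equal_chi_hook : Prop := ∀ (hook_part : List Int) (mu : List Int), Dom_chi_hook hook_part mu → Pre_chi_hook hook_part mu → Spec_chi_hook hook_part mu (chi_hook hook_part mu)

-- ===== LEMMAS AND PROOFS =====

-- (-1)^e computed by parity (the value A's branch adds, as a function of e)
def sgn (e : Int) : Int := if PySem.Int.mod e 2 = 0 then 1 else -1

theorem sgn_sub_one (e : Int) : sgn (e - 1) = -sgn e := by
  unfold sgn
  rw [PySem.Int.mod_eq_emod_of_pos (by omega), PySem.Int.mod_eq_emod_of_pos (by omega)]
  rcases Int.emod_two_eq e with h | h <;> rcases Int.emod_two_eq (e - 1) with h' | h' <;>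
    simp [h, h'] <;> omega

-- signed subset-sum count: Fsub l t = Σ_{S ⊆ l, sum S = t} (-1)^{|S|}
def Fsub : List Int → Int → Int
  | [], t => if t = 0 then 1 else 0
  | m :: l, t => Fsub l t - Fsub l (t - m)

-- ---- A side: the mask enumeration computes sgn target * Fsub mu target ----

-- A's inner loop, as a function of the list and the mask
def maskS (l : List Int) (mask : Nat) : Int :=
  (List.range l.length).foldl
    (fun acc i => if Nat.testBit mask i then acc + (PySem.List.pyGet? l (Int.ofNat i)).getD 0 else acc) 0

theorem maskS_sum (l : List Int) (mask : Nat) :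
    maskS l mask = ((List.range l.length).map
      (fun i => if Nat.testBit mask i then (PySem.List.pyGet? l (Int.ofNat i)).getD 0 else 0)).sum := by
  unfold maskS
  rw [PySem.List.foldl_congr_mem _ _ (fun acc i => acc + if Nat.testBit mask i then (PySem.List.pyGet? l (Int.ofNat i)).getD 0 else 0) _
    (by intro acc x _; split <;> simp_all)]
  rw [PySem.List.foldl_add]
  simp

theorem maskS_cons (m : Int) (l : List Int) (mask : Nat) :
    maskS (m :: l) mask = (if Nat.testBit mask 0 then m else 0) + maskS l (mask / 2) := by
  rw [maskS_sum, maskS_sum]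
  rw [List.length_cons, List.range_succ_eq_map]
  rw [List.map_cons, List.sum_cons, List.map_map]
  congr 1
  · simp
  · apply congrArg
    apply List.map_congr_left
    intro i hi
    simp only [Function.comp, Nat.succ_eq_add_one, Nat.testBit_succ]
    congr 1
    have h1 : (Int.ofNat (i + 1)) = ((i + 1 : Nat) : Int) := rfl
    have h2 : (Int.ofNat i) = ((i : Nat) : Int) := rfl
    rw [h1, h2, PySem.List.pyGet?_natCast, PySem.List.pyGet?_natCast]
    simp

theorem sum_range_double (n : Nat) (f : Nat → Int) :
    ((List.range (2 * n)).map f).sum = ((List.range n).map (fun i => f (2 * i) + f (2 * i + 1))).sum := by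
  induction n with
  | zero => rfl
  | succ n ih =>
      have h : 2 * (n + 1) = (2 * n) + 1 + 1 := by ring
      rw [h, List.range_succ, List.range_succ, List.range_succ]
      simp only [List.map_append, List.sum_append, List.map_cons, List.map_nil, List.sum_cons,
        List.sum_nil, ih]
      ring

theorem bitCount_double (i : Nat) :
    PySem.Int.bitCount ((2 * i : Nat) : Int) = PySem.Int.bitCount (i : Int) := by
  rcases Nat.eq_zero_or_pos i with h | h
  · simp [h]
  · rw [PySem.Int.bitCount_natCast (by omega)]
    have h2 : (2 * i) % 2 = 0 := by omega
    have h3 : (2 * i) / 2 = i := by omega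
    rw [h2, h3]; omega

theorem bitCount_double_add_one (i : Nat) :
    PySem.Int.bitCount ((2 * i + 1 : Nat) : Int) = PySem.Int.bitCount (i : Int) + 1 := by
  rw [PySem.Int.bitCount_natCast (by omega)]
  have h2 : (2 * i + 1) % 2 = 1 := by omega
  have h3 : (2 * i + 1) / 2 = i := by omega
  rw [h2, h3]; omega

-- the summand of A's outer loop, generalized over an already-fixed prefix
def termA (tg : Int) (l : List Int) (s0 : Int) (k0 : Nat) (mask : Nat) : Int :=
  if s0 + maskS l mask = tg then sgn (tg - ((k0 : Int) + (PySem.Int.bitCount (mask : Int) : Int))) else 0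

theorem termA_even (tg m : Int) (l : List Int) (s0 : Int) (k0 i : Nat) :
    termA tg (m :: l) s0 k0 (2 * i) = termA tg l s0 k0 i := by
  unfold termA
  rw [maskS_cons]
  have hb : Nat.testBit (2 * i) 0 = false := by simp [Nat.testBit_zero]
  have hd : 2 * i / 2 = i := by omega
  rw [hb, hd, bitCount_double]
  simp

theorem termA_odd (tg m : Int) (l : List Int) (s0 : Int) (k0 i : Nat) :
    termA tg (m :: l) s0 k0 (2 * i + 1) = termA tg l (s0 + m) (k0 + 1) i := by
  unfold termA
  rw [maskS_cons]
  have hb : Nat.testBit (2 * i + 1) 0 = true := by simp [Nat.testBit_zero]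
  have hd : (2 * i + 1) / 2 = i := by omega
  rw [hb, hd, bitCount_double_add_one]
  have h1 : s0 + (m + maskS l (i : Nat)) = s0 + m + maskS l i := by ring
  norm_num
  have h2 : tg - ((k0 : Int) + ((PySem.Int.bitCount (i : Int) : Int) + 1))
      = tg - ((k0 : Int) + 1 + (PySem.Int.bitCount (i : Int) : Int)) := by ring
  rw [h1, h2]

theorem masksum (l : List Int) (tg : Int) : ∀ (s0 : Int) (k0 : Nat),
    ((List.range (2 ^ l.length)).map (termA tg l s0 k0)).sum
      = sgn (tg - (k0 : Int)) * Fsub l (tg - s0) := by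
  induction l with
  | nil =>
      intro s0 k0
      simp only [List.length_nil, pow_zero, List.range_one, List.map_cons, List.map_nil,
        List.sum_cons, List.sum_nil, termA, maskS, Fsub]
      simp only [List.range_zero, List.foldl_nil, Nat.cast_zero, PySem.Int.bitCount_zero]
      by_cases h : s0 = tg
      · rw [if_pos (by omega), if_pos (by omega)]
        simp
      · rw [if_neg (by omega), if_neg (by omega)]
        simp
  | cons m l ih =>
      intro s0 k0
      have hlen : 2 ^ (m :: l).length = 2 * 2 ^ l.length := by
        simp [List.length_cons]; ring
      rw [hlen, sum_range_double]
      simp only [termA_even, termA_odd]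
      rw [PySem.List.sum_map_add_int, ih, ih]
      have hflip : sgn (tg - ((k0 + 1 : Nat) : Int)) = - sgn (tg - k0) := by
        push_cast
        rw [show tg - ((k0 : Int) + 1) = (tg - k0) - 1 by ring, sgn_sub_one]
      rw [hflip]
      have harg : tg - (s0 + m) = tg - s0 - m := by ring
      rw [harg]
      show _ = sgn (tg - k0) * Fsub (m :: l) (tg - s0)
      simp only [Fsub]
      ring

theorem chi_hook_eq_Fsub (hook_part mu : List Int) :
    chi_hook hook_part mu =
      sgn (mu.sum - (PySem.List.pyGet? hook_part 0).getD 0)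
        * Fsub mu (mu.sum - (PySem.List.pyGet? hook_part 0).getD 0) := by
  set tg := mu.sum - (PySem.List.pyGet? hook_part 0).getD 0 with htg
  show (List.range (2 ^ mu.length)).foldl
      (fun total_chi mask =>
        if (List.range mu.length).foldl
            (fun acc i => if Nat.testBit mask i then acc + (PySem.List.pyGet? mu (Int.ofNat i)).getD 0 else acc) 0 = tg
        then total_chi + (if PySem.Int.mod (tg - ((PySem.Int.bitCount (mask : Int) : Nat) : Int)) 2 = 0 then (1 : Int) else -1)
        else total_chi) 0
    = sgn tg * Fsub mu tg
  rw [PySem.List.foldl_congr_mem _ _ (fun acc mask => acc + termA tg mu 0 0 mask) _ ?_]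
  · rw [PySem.List.foldl_add, zero_add]
    have := masksum mu tg 0 0
    simp only [Nat.cast_zero, sub_zero] at this
    rw [this]
  · intro acc mask _
    show (if maskS mu mask = tg then acc + (if PySem.Int.mod (tg - (PySem.Int.bitCount (mask : Int) : Int)) 2 = 0 then (1:Int) else -1) else acc)
        = acc + termA tg mu 0 0 mask
    unfold termA sgn
    simp only [Nat.cast_zero, zero_add]
    split_ifs <;> omega

-- ---- B side: the dict DP computes sgn target * Fsub mu target ----

-- one DP round as a transformation of the signed-count function
def stepU (m : Int) (f : Int → Int) : Int → Int :=
  fun t => f t - f (t - m)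

-- the signed-count function of the initial dict {0: 1}
def delta : Int → Int := fun t => if t = 0 then 1 else 0

-- one round of the dict loop, generalized over the iterated item list
theorem roundAux (m : Int) (ps : List (Int × Int)) :
    ∀ (e : PySem.Dict Int Int) (t : Int),
    (ps.foldl (fun ndp sc => ndp.insert (sc.1 + m) (ndp.getD (sc.1 + m) 0 - sc.2)) e).getD t 0
      = e.getD t 0 - ((ps.filter (fun sc => sc.1 = t - m)).map (·.2)).sum := by
  induction ps with
  | nil => intro e t; simp
  | cons sc rest ih =>
      intro e t
      rw [List.foldl_cons, ih, PySem.Dict.getD_insert]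
      by_cases heq : t = sc.1 + m
      · have hft : (sc.1 = t - m) := by omega
        rw [if_pos heq, List.filter_cons_of_pos (by simpa using hft)]
        simp only [List.map_cons, List.sum_cons]
        rw [heq]
        ring
      · rw [if_neg heq, List.filter_cons_of_neg (by simp; omega)]

theorem filter_sum_eq_getD (l : List (Int × Int)) (c : Int) (h : (l.map (·.1)).Nodup) :
    ((l.filter (fun sc => sc.1 = c)).map (·.2)).sum = (PySem.Dict.mk l).getD c 0 := by
  induction l with
  | nil => simp [PySem.Dict.getD_eq_get?_getD]; rfl
  | cons sc rest ih =>
      simp only [List.map_cons, List.nodup_cons] at h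
      by_cases heq : sc.1 = c
      · rw [List.filter_cons_of_pos (by simpa using heq)]
        have hnil : rest.filter (fun sc => decide (sc.1 = c)) = [] := by
          rw [List.filter_eq_nil_iff]
          intro p hp hc
          simp only [decide_eq_true_eq] at hc
          exact h.1 (by rw [heq, ← hc]; exact List.mem_map_of_mem hp)
        rw [hnil, PySem.Dict.getD_eq_get?_getD, PySem.Dict.get?_mk_cons,
          if_pos (by simpa using heq)]
        simp
      · rw [List.filter_cons_of_neg (by simpa using heq), ih h.2]
        conv_rhs => rw [PySem.Dict.getD_eq_get?_getD, PySem.Dict.get?_mk_cons,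
          if_neg (by simpa using heq)]
        rw [← PySem.Dict.getD_eq_get?_getD]

theorem nodup_fold_insert (m : Int) (ps : List (Int × Int)) :
    ∀ (e : PySem.Dict Int Int), e.keys.Nodup →
    (ps.foldl (fun ndp sc => ndp.insert (sc.1 + m) (ndp.getD (sc.1 + m) 0 - sc.2)) e).keys.Nodup := by
  induction ps with
  | nil => intro e he; simpa using he
  | cons sc rest ih =>
      intro e he
      rw [List.foldl_cons]
      exact ih _ (PySem.Dict.nodup_keys_insert _ _ _ he)

theorem dp_invariant (l : List Int) :
    ∀ (d : PySem.Dict Int Int) (f : Int → Int), d.keys.Nodup → (∀ t, d.getD t 0 = f t) →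
      (l.foldl (fun dp m =>
          dp.items.foldl (fun ndp sc =>
            ndp.insert (sc.1 + m) (ndp.getD (sc.1 + m) 0 - sc.2)) dp) d).keys.Nodup
      ∧ (∀ t, (l.foldl (fun dp m =>
          dp.items.foldl (fun ndp sc =>
            ndp.insert (sc.1 + m) (ndp.getD (sc.1 + m) 0 - sc.2)) dp) d).getD t 0
        = (l.foldl (fun f m => stepU m f) f) t) := by
  induction l with
  | nil => intro d f hnd hdf; exact ⟨hnd, by simpa using hdf⟩
  | cons m l ih =>
      intro d f hnd hdf
      rw [List.foldl_cons, List.foldl_cons]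
      apply ih
      · exact nodup_fold_insert m d.items d hnd
      · intro t
        rw [roundAux]
        have hkeys : (d.items.map (·.1)).Nodup := hnd
        rw [filter_sum_eq_getD d.items (t - m) hkeys]
        have hmk : (PySem.Dict.mk d.items) = d := rfl
        rw [hmk, hdf, hdf]
        rfl

theorem Fsub_append (l : List Int) (m : Int) (t : Int) :
    Fsub (l ++ [m]) t = Fsub l t - Fsub l (t - m) := by
  induction l generalizing t with
  | nil => simp [Fsub]
  | cons a l ih =>
      simp only [List.cons_append, Fsub, ih]
      have h : t - a - m = t - m - a := by ring
      rw [h]; ring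

theorem unbounded_eq_Fsub (l : List Int) :
    ∀ t, (l.foldl (fun f m => stepU m f) delta) t = Fsub l t := by
  induction l using List.reverseRecOn with
  | nil => intro t; simp [Fsub, delta]
  | append_singleton l m ih =>
      intro t
      rw [List.foldl_append]
      simp only [List.foldl_cons, List.foldl_nil, stepU, Fsub_append, ih]

theorem dict0_nodup : (PySem.Dict.ofList [((0 : Int), (1 : Int))]).keys.Nodup := by decide

theorem dict0_getD (t : Int) : (PySem.Dict.ofList [((0 : Int), (1 : Int))]).getD t 0 = delta t := by
  have hmk : PySem.Dict.ofList [((0 : Int), (1 : Int))] = PySem.Dict.mk [((0 : Int), (1 : Int))] := rfl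
  rw [hmk, PySem.Dict.getD_eq_get?_getD, PySem.Dict.get?_mk_cons]
  by_cases h : t = 0
  · rw [if_pos (by simpa using h.symm)]
    simp [delta, h]
  · rw [if_neg (by simpa using fun e => h e.symm)]
    simp [delta, h]
    rfl

theorem chi_hook_alt_eq_Fsub (hook_part mu : List Int) :
    chi_hook_alt hook_part mu =
      sgn (mu.sum - (PySem.List.pyGet? hook_part 0).getD 0)
        * Fsub mu (mu.sum - (PySem.List.pyGet? hook_part 0).getD 0) := by
  set tg := mu.sum - (PySem.List.pyGet? hook_part 0).getD 0 with htg
  show sgn tg * ((mu.foldl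
      (fun dp m =>
        dp.items.foldl
          (fun ndp sc => ndp.insert (sc.1 + m) (ndp.getD (sc.1 + m) 0 - sc.2))
          dp)
      (PySem.Dict.ofList [((0 : Int), (1 : Int))])).getD tg 0)
    = sgn tg * Fsub mu tg
  congr 1
  rw [(dp_invariant mu (PySem.Dict.ofList [((0 : Int), (1 : Int))]) delta dict0_nodup dict0_getD).2 tg]
  exact unbounded_eq_Fsub mu tg

-- ===== VERDICT (by name: the statement is the Claim_ definition above) =====
theorem chi_hook_spec : Claim_equal_chi_hook := by
  intro hook_part mu _ _
  unfold Spec_chi_hook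
  rw [chi_hook_eq_Fsub, chi_hook_alt_eq_Fsub hook_part mu]
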